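-- pv_equiv track=rewrite | github.com/nipdep/sudo-uri-resolver | uri_resolver/main.py | _classify_describe_kind
-- ===== SOURCE A (Python) =====
-- def _classify_describe_kind(type_labels: list[str]) -> str:
--     lowered = {label.lower() for label in type_labels}
--     if any("sudo:artifact" == label for label in lowered):
--         return "artifact"
--     if any("sudo:argument" == label for label in lowered):
--         return "argument"
--     if any("sudo:descriptor" == label for label in lowered):
--         return "descriptor"
--     if any(label.endswith("researchpaper") or label.endswith(":paper") for label in lowered):
--         return "paper"
--     return "generic"
-- ===== SOURCE B (Python) =====
-- def _classify_describe_kind(type_labels: list[str]) -> str: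
--     lowered = {label.lower() for label in type_labels}
--     seen = set()
--     for label in lowered:
--         if label == "sudo:artifact":
--             seen.add("artifact")
--         elif label == "sudo:argument":
--             seen.add("argument")
--         elif label == "sudo:descriptor":
--             seen.add("descriptor")
--         elif label.endswith("researchpaper") or label.endswith(":paper"):
--             seen.add("paper")
--     for kind in ("artifact", "argument", "descriptor", "paper"):
--         if kind in seen:
--             return kind
--     return "generic"
-- ===== Notes on version B (the rewrite author's own statement) =====
-- stated objective: alternative
-- what changed: B replaces A's four separate any() scans over the lowered set by a single pass that records seen categories into a set, followed by a walk of the fixed priority list; same exact/suffix tests and priority.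
import Mathlib
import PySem

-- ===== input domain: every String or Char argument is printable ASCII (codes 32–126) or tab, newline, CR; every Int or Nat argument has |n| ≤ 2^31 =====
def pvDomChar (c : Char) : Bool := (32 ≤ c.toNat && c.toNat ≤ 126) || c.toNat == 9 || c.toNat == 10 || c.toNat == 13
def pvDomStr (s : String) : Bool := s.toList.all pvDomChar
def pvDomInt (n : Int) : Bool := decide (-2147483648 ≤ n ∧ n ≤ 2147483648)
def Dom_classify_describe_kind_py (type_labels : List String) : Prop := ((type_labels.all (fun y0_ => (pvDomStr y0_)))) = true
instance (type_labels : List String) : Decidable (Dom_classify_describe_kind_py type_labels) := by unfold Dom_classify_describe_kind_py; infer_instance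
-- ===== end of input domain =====

-- B replaces A's four any() scans by one pass recording seen categories into a set, then a walk of the priority list (objective: alternative).

-- ===== PORT A =====
def classify_describe_kind_py (type_labels : List String) : String :=
  let lowered : PySem.Set String := PySem.Set.ofList (type_labels.map PySem.Str.lower)
  if lowered.any (fun label => "sudo:artifact" == label) then "artifact"
  else if lowered.any (fun label => "sudo:argument" == label) then "argument"
  else if lowered.any (fun label => "sudo:descriptor" == label) then "descriptor"
  else if lowered.any (fun label => PySem.Str.endswith label "researchpaper" || PySem.Str.endswith label ":paper") then "paper"
  else "generic"

-- ===== PORT B =====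
def pvClassifyStep (s : PySem.Set String) (label : String) : PySem.Set String :=
  if label == "sudo:artifact" then PySem.Set.add s "artifact"
  else if label == "sudo:argument" then PySem.Set.add s "argument"
  else if label == "sudo:descriptor" then PySem.Set.add s "descriptor"
  else if PySem.Str.endswith label "researchpaper" || PySem.Str.endswith label ":paper" then PySem.Set.add s "paper"
  else s

def classify_describe_kind_py_alt (type_labels : List String) : String :=
  let lowered : PySem.Set String := PySem.Set.ofList (type_labels.map PySem.Str.lower)
  let seen : PySem.Set String := lowered.foldl pvClassifyStep PySem.Set.empty
  match ["artifact", "argument", "descriptor", "paper"].find? (fun k => PySem.Set.contains seen k) with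
  | some k => k
  | none => "generic"

-- ===== PRECONDITION & SPEC =====
def Spec_classify_describe_kind_py (type_labels : List String) (out : String) : Prop := out = classify_describe_kind_py_alt type_labels
instance (type_labels : List String) (out : String) : Decidable (Spec_classify_describe_kind_py type_labels out) := by unfold Spec_classify_describe_kind_py; infer_instance

-- ===== CLAIM (what is proved, stated in full; the proofs are below) =====
def Claim_equal_classify_describe_kind_py : Prop := ∀ (type_labels : List String), Dom_classify_describe_kind_py type_labels → Spec_classify_describe_kind_py type_labels (classify_describe_kind_py type_labels)

-- ===== LEMMAS AND PROOFS =====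

-- the predicate for the "paper" branch
def pvIsPaper (label : String) : Bool := PySem.Str.endswith label "researchpaper" || PySem.Str.endswith label ":paper"

-- membership of each category flag after the fold
theorem pv_mem_foldl (k : String) (p : String → Bool)
    (h : ∀ s label, k ∈ pvClassifyStep s label ↔ k ∈ s ∨ p label = true) :
    ∀ (l : List String) (s : PySem.Set String),
      k ∈ l.foldl pvClassifyStep s ↔ k ∈ s ∨ l.any p := by
  intro l
  induction l with
  | nil => intro s; simp
  | cons x xs ih =>
    intro s
    simp only [List.foldl_cons, List.any_cons, ih, h, Bool.or_eq_true]
    tauto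

theorem pv_step_artifact (s : PySem.Set String) (label : String) :
    "artifact" ∈ pvClassifyStep s label ↔ "artifact" ∈ s ∨ (label == "sudo:artifact") = true := by
  unfold pvClassifyStep
  split_ifs with h1 h2 h3 h4 <;>
    simp_all [PySem.Set.mem_add]

theorem pv_step_argument (s : PySem.Set String) (label : String) :
    "argument" ∈ pvClassifyStep s label ↔ "argument" ∈ s ∨ (label == "sudo:argument") = true := by
  unfold pvClassifyStep
  split_ifs with h1 h2 h3 h4 <;>
    simp_all [PySem.Set.mem_add]

theorem pv_step_descriptor (s : PySem.Set String) (label : String) :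
    "descriptor" ∈ pvClassifyStep s label ↔ "descriptor" ∈ s ∨ (label == "sudo:descriptor") = true := by
  unfold pvClassifyStep
  split_ifs with h1 h2 h3 h4 <;>
    simp_all [PySem.Set.mem_add]

-- none of the three exact sudo strings satisfies the paper suffix test, so B's elif chain is exact
theorem pv_step_paper (s : PySem.Set String) (label : String) :
    "paper" ∈ pvClassifyStep s label ↔ "paper" ∈ s ∨ (!(label == "sudo:artifact") && !(label == "sudo:argument") && !(label == "sudo:descriptor") && pvIsPaper label) = true := by
  unfold pvClassifyStep pvIsPaper
  split_ifs with h1 h2 h3 h4 <;>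
    simp_all [PySem.Set.mem_add]

-- ===== VERDICT (by name: the statement is the Claim_ definition above) =====
theorem classify_describe_kind_py_spec : Claim_equal_classify_describe_kind_py := by
  intro type_labels _
  unfold Spec_classify_describe_kind_py classify_describe_kind_py classify_describe_kind_py_alt
  set lowered := PySem.Set.ofList (type_labels.map PySem.Str.lower) with hlow
  have hart := pv_mem_foldl "artifact" (fun label => label == "sudo:artifact") pv_step_artifact lowered PySem.Set.empty
  have harg := pv_mem_foldl "argument" (fun label => label == "sudo:argument") pv_step_argument lowered PySem.Set.empty
  have hdes := pv_mem_foldl "descriptor" (fun label => label == "sudo:descriptor") pv_step_descriptor lowered PySem.Set.empty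
  have hpap := pv_mem_foldl "paper" (fun label => !(label == "sudo:artifact") && !(label == "sudo:argument") && !(label == "sudo:descriptor") && pvIsPaper label) pv_step_paper lowered PySem.Set.empty
  simp only [PySem.Set.empty, List.not_mem_nil, false_or, List.any_eq_true, beq_iff_eq,
    Bool.and_eq_true, Bool.not_eq_eq_eq_not, Bool.not_true, beq_eq_false_iff_ne] at hart harg hdes hpap
  by_cases m1 : "sudo:artifact" ∈ lowered
  · have f1 : "artifact" ∈ lowered.foldl pvClassifyStep [] := hart.2 ⟨_, m1, rfl⟩
    simp [List.find?, m1, f1]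
  · have n1 : "artifact" ∉ lowered.foldl pvClassifyStep [] := by
      rw [hart]; rintro ⟨x, hx, rfl⟩; exact m1 hx
    by_cases m2 : "sudo:argument" ∈ lowered
    · have f2 : "argument" ∈ lowered.foldl pvClassifyStep [] := harg.2 ⟨_, m2, rfl⟩
      simp [List.find?, m1, m2, f2, n1]
    · have n2 : "argument" ∉ lowered.foldl pvClassifyStep [] := by
        rw [harg]; rintro ⟨x, hx, rfl⟩; exact m2 hx
      by_cases m3 : "sudo:descriptor" ∈ lowered
      · have f3 : "descriptor" ∈ lowered.foldl pvClassifyStep [] := hdes.2 ⟨_, m3, rfl⟩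
        simp [List.find?, m1, m2, m3, f3, n1, n2]
      · have n3 : "descriptor" ∉ lowered.foldl pvClassifyStep [] := by
          rw [hdes]; rintro ⟨x, hx, rfl⟩; exact m3 hx
        by_cases m4 : ∃ x ∈ lowered, pvIsPaper x = true
        · obtain ⟨x, hx, hpx⟩ := m4
          have e1 : x ≠ "sudo:artifact" := by rintro rfl; exact m1 hx
          have e2 : x ≠ "sudo:argument" := by rintro rfl; exact m2 hx
          have e3 : x ≠ "sudo:descriptor" := by rintro rfl; exact m3 hx
          have f4 : "paper" ∈ lowered.foldl pvClassifyStep [] := by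
            rw [hpap]; exact ⟨x, hx, ⟨⟨e1, e2⟩, e3⟩, hpx⟩
          have hor : PySem.Str.endswith x "researchpaper" = true ∨ PySem.Str.endswith x ":paper" = true := by
            simpa [pvIsPaper, Bool.or_eq_true] using hpx
          have hEx : ∃ y ∈ lowered, PySem.Chars.endswith y.toList ['r','e','s','e','a','r','c','h','p','a','p','e','r'] = true ∨ PySem.Chars.endswith y.toList [':','p','a','p','e','r'] = true := by
            refine ⟨x, hx, ?_⟩
            simpa [PySem.Str.endswith] using hor
          simp [List.find?, m1, m2, m3, f4, n1, n2, n3, PySem.Str.endswith, hEx]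
        · have n4 : "paper" ∉ lowered.foldl pvClassifyStep [] := by
            rw [hpap]; rintro ⟨x, hx, _, hpx⟩; exact m4 ⟨x, hx, hpx⟩
          have m4'' : ∀ x ∈ lowered, PySem.Chars.endswith x.toList ['r','e','s','e','a','r','c','h','p','a','p','e','r'] = false ∧ PySem.Chars.endswith x.toList [':','p','a','p','e','r'] = false := by
            intro x hx
            have h := fun hp => m4 ⟨x, hx, hp⟩
            simpa [pvIsPaper, PySem.Str.endswith] using h
          simp [List.find?, m1, m2, m3, n1, n2, n3, n4, PySem.Str.endswith]
          exact m4''
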